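-- pv_equiv track=rewrite | github.com/kazu0716/programing_training | atcoder/ABC/122/d.py | contain_AGC
-- ===== SOURCE A (Python) =====
-- def contain_AGC(s: str) -> bool:
--     for i in range(len(s)):
--         s_list = list(s)
--         if i > 0:
--             s_list[i - 1], s_list[i] = s_list[i], s_list[i - 1]
--         if "AGC" in "".join(s_list):
--             return True
--     return False
-- ===== SOURCE B (Python) =====
-- def contain_AGC(s: str) -> bool:
--     # One O(n) scan: an adjacent swap can create "AGC" only inside a
--     # 4-character window, so check each window against the few patterns
--     # ("AGC" already present, "GAC", "ACG", "AG?C", "A?GC").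
--     n = len(s)
--     for j in range(n - 2):
--         a, b, c = s[j], s[j + 1], s[j + 2]
--         if (a == "A" and b == "G" and c == "C") or \
--            (a == "G" and b == "A" and c == "C") or \
--            (a == "A" and b == "C" and c == "G"):
--             return True
--         if j + 3 < n and a == "A" and s[j + 3] == "C" and (b == "G" or c == "G"):
--             return True
--     return False
-- ===== Notes on version B (the rewrite author's own statement) =====
-- stated objective: faster
-- what changed: A rebuilds the whole character list and runs a substring search for every swap position; B makes one linear scan, testing each constant-size 3/4-character window against the few patterns (AGC, GAC, ACG, AG?C, A?GC) that a single adjacent swap can turn into AGC.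
import Mathlib
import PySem

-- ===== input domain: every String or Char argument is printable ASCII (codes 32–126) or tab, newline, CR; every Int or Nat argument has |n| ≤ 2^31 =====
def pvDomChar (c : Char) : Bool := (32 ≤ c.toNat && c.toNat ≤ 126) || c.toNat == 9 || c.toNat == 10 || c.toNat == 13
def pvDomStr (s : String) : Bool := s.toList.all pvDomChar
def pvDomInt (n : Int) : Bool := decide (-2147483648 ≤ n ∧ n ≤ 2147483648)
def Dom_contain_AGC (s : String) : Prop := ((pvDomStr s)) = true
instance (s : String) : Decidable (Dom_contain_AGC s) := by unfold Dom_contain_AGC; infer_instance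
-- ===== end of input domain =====

-- B replaces A's quadratic swap-and-search loop by one linear scan over
-- constant-size windows (objective: faster, asymptotic).


-- ===== PORT A =====
-- one iteration of A's loop body: rebuild the list, swap positions i-1, i
-- (if i > 0; both indices are in range for i in range(len(s))), then test
-- `"AGC" in "".join(s_list)` (PySem.Chars.isIn on the char list)
def aSwapCheck (s : String) (i : Int) : Bool :=
  let sl := s.toList
  let sl' :=
    if i > 0 then
      -- s_list[i-1], s_list[i] = s_list[i], s_list[i-1]
      PySem.List.pySetD
        (PySem.List.pySetD sl (i - 1) (PySem.List.pyGetD sl i ' '))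
        i (PySem.List.pyGetD sl (i - 1) ' ')
    else sl
  PySem.Chars.isIn ['A', 'G', 'C'] sl'

-- `for i in range(len(s)): … return True` as recursion over the range list
def aLoop (s : String) : List Int → Bool
  | [] => false
  | i :: rest => if aSwapCheck s i then true else aLoop s rest

def contain_AGC (s : String) : Bool :=
  aLoop s (PySem.List.pyRange 0 (PySem.Str.len s) 1)

-- ===== PORT B =====
-- B's loop body for index j: the three 3-char patterns, then the guarded
-- 4-char window (indices j..j+2 are in range for j in range(n-2))
def bCheck (cs : List Char) (n j : Int) : Bool :=
  let a := PySem.List.pyGetD cs j ' '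
  let b := PySem.List.pyGetD cs (j + 1) ' '
  let c := PySem.List.pyGetD cs (j + 2) ' '
  if (a == 'A' && b == 'G' && c == 'C') ||
     (a == 'G' && b == 'A' && c == 'C') ||
     (a == 'A' && b == 'C' && c == 'G') then true
  else if decide (j + 3 < n) && a == 'A' &&
          PySem.List.pyGetD cs (j + 3) ' ' == 'C' && (b == 'G' || c == 'G') then true
  else false

def bLoop (cs : List Char) (n : Int) : List Int → Bool
  | [] => false
  | j :: rest => if bCheck cs n j then true else bLoop cs n rest

def contain_AGC_alt (s : String) : Bool :=
  let n := PySem.Str.len s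
  bLoop s.toList n (PySem.List.pyRange 0 (n - 2) 1)

-- ===== PRECONDITION & SPEC =====
def Spec_contain_AGC (s : String) (out : Bool) : Prop := out = contain_AGC_alt s
instance (s : String) (out : Bool) : Decidable (Spec_contain_AGC s out) := by unfold Spec_contain_AGC; infer_instance

-- ===== CLAIM (what is proved, stated in full; the proofs are below) =====
def Claim_equal_contain_AGC : Prop := ∀ (s : String), Dom_contain_AGC s → Spec_contain_AGC s (contain_AGC s)

-- ===== LEMMAS AND PROOFS =====

-- "AGC occurs at position j of l"
def occursAt (l : List Char) (j : Nat) : Prop :=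
  l[j]? = some 'A' ∧ l[j + 1]? = some 'G' ∧ l[j + 2]? = some 'C'

-- the list A's iteration i actually searches
def swp (l : List Char) (i : Nat) : List Char :=
  if i = 0 then l else (l.set (i - 1) (l.getD i ' ')).set i (l.getD (i - 1) ' ')

-- the window condition B tests at position j
def W (l : List Char) (j : Nat) : Prop :=
  occursAt l j ∨
  (l[j]? = some 'G' ∧ l[j + 1]? = some 'A' ∧ l[j + 2]? = some 'C') ∨
  (l[j]? = some 'A' ∧ l[j + 1]? = some 'C' ∧ l[j + 2]? = some 'G') ∨
  (j + 3 < l.length ∧ l[j]? = some 'A' ∧ l[j + 3]? = some 'C' ∧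
    (l[j + 1]? = some 'G' ∨ l[j + 2]? = some 'G'))

theorem swp_get (l : List Char) (i : Nat) (h1 : 1 ≤ i) (h2 : i < l.length) (k : Nat) :
    (swp l i)[k]? = if k = i then l[i - 1]? else if k = i - 1 then l[i]? else l[k]? := by
  have hi1 : i - 1 < l.length := by omega
  simp only [swp, if_neg (by omega : ¬ i = 0), List.getElem?_set, List.length_set,
    List.getD_eq_getElem l ' ' h2, List.getD_eq_getElem l ' ' hi1]
  split_ifs with a b c d e <;> first
    | rfl
    | omega
    | (subst_vars; rw [List.getElem?_eq_getElem h2])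
    | (subst_vars; rw [List.getElem?_eq_getElem hi1])

theorem aLoop_any (s : String) (r : List Int) : aLoop s r = r.any (aSwapCheck s) := by
  induction r with
  | nil => rfl
  | cons i rest ih => simp [aLoop, ih, List.any_cons]

theorem bLoop_any (cs : List Char) (n : Int) (r : List Int) :
    bLoop cs n r = r.any (bCheck cs n) := by
  induction r with
  | nil => rfl
  | cons j rest ih => simp [bLoop, ih, List.any_cons]

theorem infix3_iff (a b c : Char) (t : List Char) :
    [a, b, c] <:+: t ↔ ∃ j : Nat, t[j]? = some a ∧ t[j+1]? = some b ∧ t[j+2]? = some c := by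
  induction t with
  | nil => simp
  | cons x t ih =>
    rw [List.infix_cons_iff]
    constructor
    · rintro (hpre | hinf)
      · obtain ⟨r, hr⟩ := hpre
        exact ⟨0, by simp [← hr]⟩
      · obtain ⟨j, h⟩ := ih.mp hinf
        exact ⟨j + 1, by simpa using h⟩
    · rintro ⟨j, h1, h2, h3⟩
      cases j with
      | zero =>
        left
        match t, h2, h3 with
        | y :: z :: t, h2, h3 =>
          simp only [List.getElem?_cons_zero, List.getElem?_cons_succ,
            Option.some.injEq] at h1 h2 h3
          subst h1; subst h2; subst h3
          exact ⟨t, rfl⟩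
      | succ j =>
        exact Or.inr (ih.mpr ⟨j, by simpa using h1, by simpa using h2, by simpa using h3⟩)

theorem aSwapCheck_iff (s : String) (i : Int) (h0 : 0 ≤ i) (h1 : i < s.toList.length) :
    (aSwapCheck s i = true) ↔ ∃ j : Nat, occursAt (swp s.toList i.toNat) j := by
  have heq : (if i > 0 then
      PySem.List.pySetD
        (PySem.List.pySetD s.toList (i - 1) (PySem.List.pyGetD s.toList i ' '))
        i (PySem.List.pyGetD s.toList (i - 1) ' ')
    else s.toList) = swp s.toList i.toNat := by
    by_cases hi : i > 0
    · rw [if_pos hi]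
      have hn0 : ¬ i.toNat = 0 := by omega
      rw [swp, if_neg hn0]
      rw [PySem.List.pyGetD_eq_getElem _ _ h0 h1,
          PySem.List.pyGetD_eq_getElem _ _ (by omega) (by omega),
          PySem.List.pySetD_of_nonneg _ _ (by omega),
          PySem.List.pySetD_of_nonneg _ _ (by omega)]
      rw [List.getD_eq_getElem _ _ (by omega), List.getD_eq_getElem _ _ (by omega)]
      simp only [show (i - 1).toNat = i.toNat - 1 from by omega]
    · rw [if_neg hi, swp, if_pos (by omega)]
  rw [aSwapCheck]
  simp only [heq]
  rw [PySem.Chars.isIn_iff_infix, infix3_iff]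
  rfl

theorem A_iff (s : String) :
    contain_AGC s = true ↔
      ∃ i : Nat, i < s.toList.length ∧ ∃ j : Nat, occursAt (swp s.toList i) j := by
  rw [contain_AGC, aLoop_any, List.any_eq_true]
  constructor
  · rintro ⟨i, hmem, hchk⟩
    rw [PySem.List.mem_pyRange_one, PySem.Str.len_eq] at hmem
    obtain ⟨j, hj⟩ := (aSwapCheck_iff s i hmem.1 hmem.2).mp hchk
    exact ⟨i.toNat, by omega, j, hj⟩
  · rintro ⟨i, hi, j, hj⟩
    refine ⟨(i : Int), ?_, ?_⟩
    · rw [PySem.List.mem_pyRange_one, PySem.Str.len_eq]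
      exact ⟨by positivity, by exact_mod_cast hi⟩
    · refine (aSwapCheck_iff s i (by positivity) (by exact_mod_cast hi)).mpr ?_
      exact ⟨j, by simpa using hj⟩

set_option maxHeartbeats 1000000 in
theorem bCheck_iff (cs : List Char) (j : Int) (h0 : 0 ≤ j) (h2 : j + 2 < (cs.length : Int)) :
    (bCheck cs (cs.length : Int) j = true) ↔ W cs j.toNat := by
  have hj0 : j.toNat < cs.length := by omega
  have hj1 : j.toNat + 1 < cs.length := by omega
  have hj2 : j.toNat + 2 < cs.length := by omega
  have g0 : PySem.List.pyGetD cs j ' ' = cs[j.toNat] :=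
    PySem.List.pyGetD_eq_getElem cs ' ' h0 (by omega)
  have g1 : PySem.List.pyGetD cs (j + 1) ' ' = cs[j.toNat + 1] := by
    rw [PySem.List.pyGetD_eq_getElem cs ' ' (by omega) (by omega)]
    simp only [show (j + 1).toNat = j.toNat + 1 from by omega]
  have g2 : PySem.List.pyGetD cs (j + 2) ' ' = cs[j.toNat + 2] := by
    rw [PySem.List.pyGetD_eq_getElem cs ' ' (by omega) (by omega)]
    simp only [show (j + 2).toNat = j.toNat + 2 from by omega]
  have e0 : cs[j.toNat]? = some (cs[j.toNat]) := List.getElem?_eq_getElem hj0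
  have e1 : cs[j.toNat + 1]? = some (cs[j.toNat + 1]) := List.getElem?_eq_getElem hj1
  have e2 : cs[j.toNat + 2]? = some (cs[j.toNat + 2]) := List.getElem?_eq_getElem hj2
  by_cases h3 : j + 3 < (cs.length : Int)
  · have hj3 : j.toNat + 3 < cs.length := by omega
    have g3 : PySem.List.pyGetD cs (j + 3) ' ' = cs[j.toNat + 3] := by
      rw [PySem.List.pyGetD_eq_getElem cs ' ' (by omega) (by omega)]
      simp only [show (j + 3).toNat = j.toNat + 3 from by omega]
    have e3 : cs[j.toNat + 3]? = some (cs[j.toNat + 3]) := List.getElem?_eq_getElem hj3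
    simp only [bCheck, g0, g1, g2, g3, decide_eq_true h3, W, occursAt, e0, e1, e2, e3,
      Option.some.injEq, Bool.if_true_left, Bool.if_false_right, Bool.or_eq_true,
      Bool.and_eq_true, beq_iff_eq, Bool.true_and, decide_eq_true_eq, and_true]
    have := hj3
    tauto
  · have hd : decide (j + 3 < (cs.length : Int)) = false := by simpa using h3
    have h4 : ¬ (j.toNat + 3 < cs.length) := by omega
    simp only [bCheck, g0, g1, g2, hd, W, occursAt, e0, e1, e2, Option.some.injEq,
      Bool.false_and, Bool.if_true_left, Bool.if_false_right, Bool.or_eq_true,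
      Bool.and_eq_true, beq_iff_eq, decide_eq_true_eq, and_true,
      Bool.false_eq_true, or_false]
    tauto

theorem B_iff (s : String) :
    contain_AGC_alt s = true ↔ ∃ j : Nat, j + 2 < s.toList.length ∧ W s.toList j := by
  rw [contain_AGC_alt]
  simp only [PySem.Str.len_eq]
  rw [bLoop_any, List.any_eq_true]
  constructor
  · rintro ⟨j, hmem, hchk⟩
    rw [PySem.List.mem_pyRange_one] at hmem
    exact ⟨j.toNat, by omega, (bCheck_iff s.toList j hmem.1 (by omega)).mp hchk⟩
  · rintro ⟨j, hj, hw⟩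
    refine ⟨(j : Int), ?_, ?_⟩
    · rw [PySem.List.mem_pyRange_one]
      exact ⟨by positivity, by omega⟩
    · refine (bCheck_iff s.toList (j : Int) (by positivity) (by omega)).mpr ?_
      simpa using hw

-- the combinatorial heart: one adjacent swap can create "AGC" exactly when
-- one of B's windows matches
theorem main_iff (l : List Char) :
    (∃ i : Nat, i < l.length ∧ ∃ j : Nat, occursAt (swp l i) j) ↔
      (∃ j : Nat, j + 2 < l.length ∧ W l j) := by
  constructor
  · rintro ⟨i, hi, j, hA, hG, hC⟩
    by_cases hi0 : i = 0
    · subst hi0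
      rw [show swp l 0 = l from by simp [swp]] at hA hG hC
      obtain ⟨hb, -⟩ := List.getElem?_eq_some_iff.mp hC
      exact ⟨j, by omega, Or.inl ⟨hA, hG, hC⟩⟩
    · have h1 : 1 ≤ i := by omega
      rw [swp_get l i h1 hi j] at hA
      rw [swp_get l i h1 hi (j + 1)] at hG
      rw [swp_get l i h1 hi (j + 2)] at hC
      have hblen : j + 2 < l.length := by
        by_cases c1 : j + 2 = i
        · omega
        · by_cases c2 : j + 2 = i - 1
          · omega
          · rw [if_neg c1, if_neg c2] at hC
            obtain ⟨hb, -⟩ := List.getElem?_eq_some_iff.mp hC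
            omega
      by_cases c1 : i = j
      · -- swap (j-1, j): pattern A ? G C at j-1
        rw [if_pos (by omega)] at hA
        rw [if_neg (by omega), if_neg (by omega)] at hG
        rw [if_neg (by omega), if_neg (by omega)] at hC
        refine ⟨j - 1, by omega, Or.inr (Or.inr (Or.inr ⟨by omega, ?_, ?_, Or.inr ?_⟩))⟩
        · simpa [show j - 1 = i - 1 from by omega] using hA
        · simpa [show j - 1 + 3 = j + 2 from by omega] using hC
        · simpa [show j - 1 + 2 = j + 1 from by omega] using hG
      · by_cases c2 : i = j + 1
        · -- swap (j, j+1): G A C at j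
          rw [if_neg (by omega), if_pos (by omega)] at hA
          rw [if_pos (by omega)] at hG
          rw [if_neg (by omega), if_neg (by omega)] at hC
          refine ⟨j, hblen, Or.inr (Or.inl ⟨?_, ?_, hC⟩)⟩
          · simpa [show i - 1 = j from by omega] using hG
          · simpa [show i = j + 1 from c2] using hA
        · by_cases c3 : i = j + 2
          · -- swap (j+1, j+2): A C G at j
            rw [if_neg (by omega), if_neg (by omega)] at hA
            rw [if_neg (by omega), if_pos (by omega)] at hG
            rw [if_pos (by omega)] at hC
            refine ⟨j, hblen, Or.inr (Or.inr (Or.inl ⟨hA, ?_, ?_⟩))⟩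
            · simpa [show i - 1 = j + 1 from by omega] using hC
            · simpa [show i = j + 2 from c3] using hG
          · by_cases c4 : i = j + 3
            · -- swap (j+2, j+3): A G ? C at j
              rw [if_neg (by omega), if_neg (by omega)] at hA
              rw [if_neg (by omega), if_neg (by omega)] at hG
              rw [if_neg (by omega), if_pos (by omega)] at hC
              refine ⟨j, hblen, Or.inr (Or.inr (Or.inr ⟨by omega, hA, ?_, Or.inl hG⟩))⟩
              simpa [show i = j + 3 from c4] using hC
            · -- swap does not touch the window
              rw [if_neg (by omega), if_neg (by omega)] at hA
              rw [if_neg (by omega), if_neg (by omega)] at hG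
              rw [if_neg (by omega), if_neg (by omega)] at hC
              exact ⟨j, hblen, Or.inl ⟨hA, hG, hC⟩⟩
  · rintro ⟨j, hb, (⟨hA, hG, hC⟩ | ⟨hG, hA, hC⟩ | ⟨hA, hC, hG⟩ | ⟨h4, hA, hC, hg | hg⟩)⟩
    · exact ⟨0, by omega, j, by simpa [occursAt, swp] using ⟨hA, hG, hC⟩⟩
    · -- GAC: swap (j, j+1)
      refine ⟨j + 1, by omega, j, ?_, ?_, ?_⟩ <;>
        rw [swp_get l (j + 1) (by omega) (by omega)]
      · rw [if_neg (by omega), if_pos (by omega)]; exact hA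
      · rw [if_pos rfl]; simpa using hG
      · rw [if_neg (by omega), if_neg (by omega)]; exact hC
    · -- ACG: swap (j+1, j+2)
      refine ⟨j + 2, by omega, j, ?_, ?_, ?_⟩ <;>
        rw [swp_get l (j + 2) (by omega) (by omega)]
      · rw [if_neg (by omega), if_neg (by omega)]; exact hA
      · rw [if_neg (by omega), if_pos (by omega)]; exact hG
      · rw [if_pos rfl]; simpa using hC
    · -- AG?C: swap (j+2, j+3)
      refine ⟨j + 3, by omega, j, ?_, ?_, ?_⟩ <;>
        rw [swp_get l (j + 3) (by omega) (by omega)]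
      · rw [if_neg (by omega), if_neg (by omega)]; exact hA
      · rw [if_neg (by omega), if_neg (by omega)]; exact hg
      · rw [if_neg (by omega), if_pos (by omega)]; simpa using hC
    · -- A?GC: swap (j, j+1) creates AGC at j+1
      refine ⟨j + 1, by omega, j + 1, ?_, ?_, ?_⟩ <;>
        rw [swp_get l (j + 1) (by omega) (by omega)]
      · rw [if_pos rfl]; simpa using hA
      · rw [if_neg (by omega), if_neg (by omega)]; exact hg
      · rw [if_neg (by omega), if_neg (by omega)]; simpa using hC

-- ===== VERDICT (by name: the statement is the Claim_ definition above) =====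
theorem contain_AGC_spec : Claim_equal_contain_AGC := by
  intro s _
  unfold Spec_contain_AGC
  have := (A_iff s).trans ((main_iff s.toList).trans (B_iff s).symm)
  cases hA : contain_AGC s <;> cases hB : contain_AGC_alt s <;> simp_all
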